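-- pv_equiv track=rewrite | github.com/SirOcelot/dim-intelligence-engine | src/dim_enrichment_engine/phase39.py | build_owned_meta
-- ===== SOURCE A (Python) =====
-- S_TIER = {
--     "Witherhoard", "Buried Bloodline", "Finality's Auger", "Choir of One", "Microcosm",
--     "Outbreak Perfected", "Divinity", "Gjallarhorn", "Izanagi's Burden", "Dragon's Breath",
--     "Still Hunt", "Le Monarque", "Thunderlord", "Trinity Ghoul", "Celestial Nighthawk",
--     "Lucky Pants", "Cyrtarachne's Facade", "Caliban's Hand", "Orpheus Rig",
--     "Gyrfalcon's Hauberk", "Star-Eater Scales", "Young Ahamkara's Spine",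
-- }
--
-- A_TIER = {
--     "Ager's Scepter", "Arbalest", "Leviathan's Breath", "Sunshot", "Graviton Lance",
--     "Whisper of the Worm", "The Queenbreaker", "Tractor Cannon", "Riskrunner",
--     "Mothkeeper's Wraps", "Oathkeeper", "Relativism", "Gifted Conviction",
--     "Assassin's Cowl", "Wormhusk Crown", "Graviton Forfeit",
-- }
--
-- ROLE_HINTS = {
--     "Witherhoard": ["area control", "damage over time", "swap DPS"],
--     "Buried Bloodline": ["survivability", "void utility", "special DPS"],
--     "Finality's Auger": ["burst DPS", "boss damage"],
--     "Choir of One": ["burst DPS", "void pressure"],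
--     "Microcosm": ["shield break", "utility DPS"],
--     "Outbreak Perfected": ["sustained DPS", "ammo efficiency"],
--     "Divinity": ["support", "debuff"],
--     "Gjallarhorn": ["rocket support", "wolfpack rounds"],
--     "Izanagi's Burden": ["burst DPS", "swap damage"],
--     "Dragon's Breath": ["damage over time", "boss damage"],
--     "Still Hunt": ["precision DPS", "hunter synergy"],
--     "Le Monarque": ["overload utility", "safe ranged damage"],
--     "Thunderlord": ["easy DPS", "machine gun utility"],
--     "Trinity Ghoul": ["add clear", "low-stress farming"],
--     "Arbalest": ["barrier answer", "long-range utility"],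
--     "Leviathan's Breath": ["unstoppable utility", "safe heavy damage"],
--     "Ager's Scepter": ["crowd control", "stasis utility"],
--     "Graviton Lance": ["safe void primary", "add clear"],
--     "Riskrunner": ["arc survivability", "easy add clear"],
--     "Celestial Nighthawk": ["super burst", "boss damage"],
--     "Lucky Pants": ["hand cannon burst", "swap damage"],
--     "Cyrtarachne's Facade": ["survivability", "grapple DR"],
--     "Caliban's Hand": ["add clear", "solar knife utility"],
--     "Orpheus Rig": ["support", "super uptime"],
--     "Gyrfalcon's Hauberk": ["void DPS", "volatile loop"],
--     "Star-Eater Scales": ["super damage", "orb conversion"],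
--     "Young Ahamkara's Spine": ["ability loop", "solar utility"],
--     "Assassin's Cowl": ["healing", "panic recovery"],
--     "Wormhusk Crown": ["panic dodge heal", "survivability"],
--     "Graviton Forfeit": ["invis uptime", "safe play"],
-- }
--
-- def build_owned_meta(owned_unique: list[str]) -> str:
--     s_owned = [n for n in owned_unique if n in S_TIER]
--     a_owned = [n for n in owned_unique if n in A_TIER and n not in s_owned]
--     other_owned = [n for n in owned_unique if n not in s_owned and n not in a_owned]
--     lines = ['# Owned Meta', '']
--     for title, items in [('S-Tier', s_owned), ('A-Tier', a_owned), ('Other Owned Exotics', other_owned)]: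
--         lines.append(f'## {title}')
--         lines.extend([f"- **{item}**: {', '.join(ROLE_HINTS.get(item, []))}" if ROLE_HINTS.get(item) else f'- **{item}**' for item in items] or ['- None'])
--         lines.append('')
--     return '\n'.join(lines)
-- ===== SOURCE B (Python) =====
-- S_TIER = {
--     "Witherhoard", "Buried Bloodline", "Finality's Auger", "Choir of One", "Microcosm",
--     "Outbreak Perfected", "Divinity", "Gjallarhorn", "Izanagi's Burden", "Dragon's Breath",
--     "Still Hunt", "Le Monarque", "Thunderlord", "Trinity Ghoul", "Celestial Nighthawk",
--     "Lucky Pants", "Cyrtarachne's Facade", "Caliban's Hand", "Orpheus Rig",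
--     "Gyrfalcon's Hauberk", "Star-Eater Scales", "Young Ahamkara's Spine",
-- }
--
-- A_TIER = {
--     "Ager's Scepter", "Arbalest", "Leviathan's Breath", "Sunshot", "Graviton Lance",
--     "Whisper of the Worm", "The Queenbreaker", "Tractor Cannon", "Riskrunner",
--     "Mothkeeper's Wraps", "Oathkeeper", "Relativism", "Gifted Conviction",
--     "Assassin's Cowl", "Wormhusk Crown", "Graviton Forfeit",
-- }
--
-- ROLE_HINTS = {
--     "Witherhoard": ["area control", "damage over time", "swap DPS"],
--     "Buried Bloodline": ["survivability", "void utility", "special DPS"],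
--     "Finality's Auger": ["burst DPS", "boss damage"],
--     "Choir of One": ["burst DPS", "void pressure"],
--     "Microcosm": ["shield break", "utility DPS"],
--     "Outbreak Perfected": ["sustained DPS", "ammo efficiency"],
--     "Divinity": ["support", "debuff"],
--     "Gjallarhorn": ["rocket support", "wolfpack rounds"],
--     "Izanagi's Burden": ["burst DPS", "swap damage"],
--     "Dragon's Breath": ["damage over time", "boss damage"],
--     "Still Hunt": ["precision DPS", "hunter synergy"],
--     "Le Monarque": ["overload utility", "safe ranged damage"],
--     "Thunderlord": ["easy DPS", "machine gun utility"],
--     "Trinity Ghoul": ["add clear", "low-stress farming"],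
--     "Arbalest": ["barrier answer", "long-range utility"],
--     "Leviathan's Breath": ["unstoppable utility", "safe heavy damage"],
--     "Ager's Scepter": ["crowd control", "stasis utility"],
--     "Graviton Lance": ["safe void primary", "add clear"],
--     "Riskrunner": ["arc survivability", "easy add clear"],
--     "Celestial Nighthawk": ["super burst", "boss damage"],
--     "Lucky Pants": ["hand cannon burst", "swap damage"],
--     "Cyrtarachne's Facade": ["survivability", "grapple DR"],
--     "Caliban's Hand": ["add clear", "solar knife utility"],
--     "Orpheus Rig": ["support", "super uptime"],
--     "Gyrfalcon's Hauberk": ["void DPS", "volatile loop"],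
--     "Star-Eater Scales": ["super damage", "orb conversion"],
--     "Young Ahamkara's Spine": ["ability loop", "solar utility"],
--     "Assassin's Cowl": ["healing", "panic recovery"],
--     "Wormhusk Crown": ["panic dodge heal", "survivability"],
--     "Graviton Forfeit": ["invis uptime", "safe play"],
-- }
--
--
-- def _hint_line(item):
--     hints = ROLE_HINTS.get(item)
--     if hints:
--         return "- **" + item + "**: " + ", ".join(hints)
--     return "- **" + item + "**"
--
--
-- def _section(title, items):
--     body = "\n".join(_hint_line(i) for i in items) if items else "- None"
--     return "## " + title + "\n" + body + "\n"
--
--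
-- def build_owned_meta(owned_unique: list[str]) -> str:
--     # Single pass: classify each name into exactly one bucket as it is seen,
--     # then emit each section as its own string (no shared lines list).
--     s_owned, a_owned, other_owned = [], [], []
--     for n in owned_unique:
--         if n in S_TIER:
--             s_owned.append(n)
--         elif n in A_TIER:
--             a_owned.append(n)
--         else:
--             other_owned.append(n)
--     return ("# Owned Meta\n\n"
--             + _section("S-Tier", s_owned) + "\n"
--             + _section("A-Tier", a_owned) + "\n"
--             + _section("Other Owned Exotics", other_owned))
-- ===== Notes on version B (the rewrite author's own statement) =====
-- stated objective: alternative
-- what changed: Replaces A's three filtering passes over owned_unique (the later ones re-scanning the earlier result lists) with one single-pass if/elif/else classification into three buckets, and builds the report by concatenating per-section strings directly instead of A's shared lines list joined with '\n' at the end.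
import Mathlib
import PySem

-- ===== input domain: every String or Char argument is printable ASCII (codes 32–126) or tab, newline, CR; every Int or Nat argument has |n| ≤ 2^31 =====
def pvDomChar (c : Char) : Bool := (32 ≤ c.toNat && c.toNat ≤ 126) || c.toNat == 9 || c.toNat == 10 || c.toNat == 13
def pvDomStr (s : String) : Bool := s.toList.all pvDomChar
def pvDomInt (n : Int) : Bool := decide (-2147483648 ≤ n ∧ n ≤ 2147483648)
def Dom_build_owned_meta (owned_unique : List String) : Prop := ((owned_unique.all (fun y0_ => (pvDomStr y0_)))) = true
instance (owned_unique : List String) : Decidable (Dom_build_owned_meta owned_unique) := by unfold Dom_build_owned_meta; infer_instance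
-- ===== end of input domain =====

-- B replaces A's three filtering passes (with list re-scans) by one single-pass three-way
-- classification loop, and builds the report as per-section strings concatenated directly
-- instead of A's shared lines list joined at the end (objective: alternative).


-- ===== PORT A =====
-- module constants (Python sets / dict), shared by both ports (both Pythons share them too)
def S_TIER : PySem.Set String := PySem.Set.ofList [
  "Witherhoard", "Buried Bloodline", "Finality's Auger", "Choir of One", "Microcosm",
  "Outbreak Perfected", "Divinity", "Gjallarhorn", "Izanagi's Burden", "Dragon's Breath",
  "Still Hunt", "Le Monarque", "Thunderlord", "Trinity Ghoul", "Celestial Nighthawk",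
  "Lucky Pants", "Cyrtarachne's Facade", "Caliban's Hand", "Orpheus Rig",
  "Gyrfalcon's Hauberk", "Star-Eater Scales", "Young Ahamkara's Spine"]

def A_TIER : PySem.Set String := PySem.Set.ofList [
  "Ager's Scepter", "Arbalest", "Leviathan's Breath", "Sunshot", "Graviton Lance",
  "Whisper of the Worm", "The Queenbreaker", "Tractor Cannon", "Riskrunner",
  "Mothkeeper's Wraps", "Oathkeeper", "Relativism", "Gifted Conviction",
  "Assassin's Cowl", "Wormhusk Crown", "Graviton Forfeit"]

def ROLE_HINTS : PySem.Dict String (List String) := PySem.Dict.ofList [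
  ("Witherhoard", ["area control", "damage over time", "swap DPS"]),
  ("Buried Bloodline", ["survivability", "void utility", "special DPS"]),
  ("Finality's Auger", ["burst DPS", "boss damage"]),
  ("Choir of One", ["burst DPS", "void pressure"]),
  ("Microcosm", ["shield break", "utility DPS"]),
  ("Outbreak Perfected", ["sustained DPS", "ammo efficiency"]),
  ("Divinity", ["support", "debuff"]),
  ("Gjallarhorn", ["rocket support", "wolfpack rounds"]),
  ("Izanagi's Burden", ["burst DPS", "swap damage"]),
  ("Dragon's Breath", ["damage over time", "boss damage"]),
  ("Still Hunt", ["precision DPS", "hunter synergy"]),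
  ("Le Monarque", ["overload utility", "safe ranged damage"]),
  ("Thunderlord", ["easy DPS", "machine gun utility"]),
  ("Trinity Ghoul", ["add clear", "low-stress farming"]),
  ("Arbalest", ["barrier answer", "long-range utility"]),
  ("Leviathan's Breath", ["unstoppable utility", "safe heavy damage"]),
  ("Ager's Scepter", ["crowd control", "stasis utility"]),
  ("Graviton Lance", ["safe void primary", "add clear"]),
  ("Riskrunner", ["arc survivability", "easy add clear"]),
  ("Celestial Nighthawk", ["super burst", "boss damage"]),
  ("Lucky Pants", ["hand cannon burst", "swap damage"]),
  ("Cyrtarachne's Facade", ["survivability", "grapple DR"]),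
  ("Caliban's Hand", ["add clear", "solar knife utility"]),
  ("Orpheus Rig", ["support", "super uptime"]),
  ("Gyrfalcon's Hauberk", ["void DPS", "volatile loop"]),
  ("Star-Eater Scales", ["super damage", "orb conversion"]),
  ("Young Ahamkara's Spine", ["ability loop", "solar utility"]),
  ("Assassin's Cowl", ["healing", "panic recovery"]),
  ("Wormhusk Crown", ["panic dodge heal", "survivability"]),
  ("Graviton Forfeit", ["invis uptime", "safe play"])]

-- A's comprehension body: one bullet line per item
-- (Python truthiness of ROLE_HINTS.get(item): some nonempty list)
def fmtLine (item : String) : String :=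
  if (match PySem.Dict.get? ROLE_HINTS item with
      | some hints => !hints.isEmpty
      | none => false) then
    "- **" ++ item ++ "**: " ++ PySem.Str.join ", " (PySem.Dict.getD ROLE_HINTS item [])
  else
    "- **" ++ item ++ "**"

-- A's formatting loop: one shared lines list, joined with '\n' at the very end
def renderSections (s_owned a_owned other_owned : List String) : String :=
  let lines : List String := ["# Owned Meta", ""]
  let lines := [("S-Tier", s_owned), ("A-Tier", a_owned), ("Other Owned Exotics", other_owned)].foldl
    (fun ls (p : String × List String) =>
      let ls := ls ++ ["## " ++ p.1]
      let body := p.2.map fmtLine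
      (ls ++ (if body.isEmpty then ["- None"] else body)) ++ [""]) lines
  PySem.Str.join "\n" lines

def build_owned_meta (owned_unique : List String) : String :=
  let s_owned := owned_unique.filter (fun n => PySem.Set.contains S_TIER n)
  let a_owned := owned_unique.filter (fun n => PySem.Set.contains A_TIER n && !(s_owned.contains n))
  let other_owned := owned_unique.filter (fun n => !(s_owned.contains n) && !(a_owned.contains n))
  renderSections s_owned a_owned other_owned

-- ===== PORT B =====
-- B's _hint_line: a single .get, matched once (no second getD lookup)
def hintLine (item : String) : String :=
  match PySem.Dict.get? ROLE_HINTS item with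
  | some hints =>
      if hints.isEmpty then "- **" ++ item ++ "**"
      else "- **" ++ item ++ "**: " ++ PySem.Str.join ", " hints
  | none => "- **" ++ item ++ "**"

-- B's _section: one section rendered as its own string
def mkSection (title : String) (items : List String) : String :=
  let body := if items.isEmpty then "- None" else PySem.Str.join "\n" (items.map hintLine)
  "## " ++ title ++ "\n" ++ body ++ "\n"

-- B's single pass: each name goes into exactly one of three buckets (if / elif / else)
def classifyOwned (owned_unique : List String) : List String × List String × List String :=
  owned_unique.foldl
    (fun (acc : List String × List String × List String) n =>
      if PySem.Set.contains S_TIER n then (acc.1 ++ [n], acc.2.1, acc.2.2)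
      else if PySem.Set.contains A_TIER n then (acc.1, acc.2.1 ++ [n], acc.2.2)
      else (acc.1, acc.2.1, acc.2.2 ++ [n]))
    ([], [], [])

def build_owned_meta_alt (owned_unique : List String) : String :=
  let c := classifyOwned owned_unique
  "# Owned Meta\n\n"
    ++ mkSection "S-Tier" c.1 ++ "\n"
    ++ mkSection "A-Tier" c.2.1 ++ "\n"
    ++ mkSection "Other Owned Exotics" c.2.2

-- ===== PRECONDITION & SPEC =====
def Spec_build_owned_meta (owned_unique : List String) (out : String) : Prop := out = build_owned_meta_alt owned_unique
instance (owned_unique : List String) (out : String) : Decidable (Spec_build_owned_meta owned_unique out) := by unfold Spec_build_owned_meta; infer_instance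

-- ===== CLAIM =====
def Claim_equal_build_owned_meta : Prop := ∀ (owned_unique : List String), Dom_build_owned_meta owned_unique → Spec_build_owned_meta owned_unique (build_owned_meta owned_unique)

-- ===== LEMMAS AND PROOFS =====

-- membership in a filtered list, as the Bool that Python's 'in' computes
lemma contains_filter_of_mem {l : List String} {p : String → Bool} {n : String}
    (h : n ∈ l) : (l.filter p).contains n = p n := by
  by_cases hp : p n = true
  · simp [List.mem_filter, h, hp]
  · simp only [Bool.not_eq_true] at hp
    simp [List.mem_filter, hp]

-- B's single-pass fold computes the three one-predicate filters, from any accumulator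
lemma classify_foldl (l : List String) (s a o : List String) :
    l.foldl
      (fun (acc : List String × List String × List String) n =>
        if PySem.Set.contains S_TIER n then (acc.1 ++ [n], acc.2.1, acc.2.2)
        else if PySem.Set.contains A_TIER n then (acc.1, acc.2.1 ++ [n], acc.2.2)
        else (acc.1, acc.2.1, acc.2.2 ++ [n]))
      (s, a, o)
    = (s ++ l.filter (fun n => PySem.Set.contains S_TIER n),
       a ++ l.filter (fun n => !PySem.Set.contains S_TIER n && PySem.Set.contains A_TIER n),
       o ++ l.filter (fun n => !PySem.Set.contains S_TIER n && !PySem.Set.contains A_TIER n)) := by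
  induction l generalizing s a o with
  | nil => simp
  | cons x xs ih =>
    rw [List.foldl_cons]
    by_cases hS : PySem.Set.contains S_TIER x = true
    · rw [if_pos hS, ih]
      have hS' : x ∈ S_TIER := by simpa using hS
      simp [hS']
    · rw [if_neg hS]
      simp only [Bool.not_eq_true] at hS
      have hS' : x ∉ S_TIER := by simpa using hS
      by_cases hA : PySem.Set.contains A_TIER x = true
      · rw [if_pos hA, ih]
        have hA' : x ∈ A_TIER := by simpa using hA
        simp [hS', hA']
      · rw [if_neg hA, ih]
        simp only [Bool.not_eq_true] at hA
        have hA' : x ∉ A_TIER := by simpa using hA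
        simp [hS', hA']

-- A's second filter: the 'n not in s_owned' re-scan is exactly '¬ S-tier' on members
lemma a_filter_eq (owned : List String) :
    owned.filter (fun n => PySem.Set.contains A_TIER n &&
        !((owned.filter (fun m => PySem.Set.contains S_TIER m)).contains n))
    = owned.filter (fun n => !PySem.Set.contains S_TIER n && PySem.Set.contains A_TIER n) := by
  apply List.filter_congr
  intro n hn
  beta_reduce
  rw [contains_filter_of_mem hn]
  cases PySem.Set.contains S_TIER n <;> cases PySem.Set.contains A_TIER n <;> rfl

-- A's third filter: 'not in s_owned and not in a_owned' is '¬ S-tier ∧ ¬ A-tier' on members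
lemma o_filter_eq (owned : List String) :
    owned.filter (fun n => !((owned.filter (fun m => PySem.Set.contains S_TIER m)).contains n) &&
        !((owned.filter (fun m => !PySem.Set.contains S_TIER m && PySem.Set.contains A_TIER m)).contains n))
    = owned.filter (fun n => !PySem.Set.contains S_TIER n && !PySem.Set.contains A_TIER n) := by
  apply List.filter_congr
  intro n hn
  beta_reduce
  rw [contains_filter_of_mem hn, contains_filter_of_mem hn]
  cases PySem.Set.contains S_TIER n <;> cases PySem.Set.contains A_TIER n <;> rfl

-- A's bullet line equals B's bullet line (getD after get? vs one matched get?)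
lemma fmt_eq_hint : fmtLine = hintLine := by
  funext item
  unfold fmtLine hintLine
  cases h : PySem.Dict.get? ROLE_HINTS item with
  | none => simp
  | some hints =>
    simp only [PySem.Dict.getD, h, Option.getD_some]
    cases hE : hints.isEmpty <;> simp_all

-- intercalate over a cons with a nonempty tail
lemma inter_cons (sep x : List Char) (l : List (List Char)) (h : l ≠ []) :
    sep.intercalate (x :: l) = x ++ sep ++ sep.intercalate l := by
  cases l with
  | nil => exact absurd rfl h
  | cons y t => simp [List.intercalate, List.intersperse]

-- intercalate distributes over ++ of two nonempty lists
lemma inter_append (sep : List Char) (l1 l2 : List (List Char)) (h1 : l1 ≠ []) (h2 : l2 ≠ []) :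
    sep.intercalate (l1 ++ l2) = sep.intercalate l1 ++ sep ++ sep.intercalate l2 := by
  induction l1 with
  | nil => exact absurd rfl h1
  | cons x xs ih =>
    cases xs with
    | nil =>
      rw [List.singleton_append, inter_cons _ _ _ h2]
      simp [List.intercalate]
    | cons y t =>
      rw [List.cons_append, inter_cons sep x (y :: t ++ l2) (by simp), ih (by simp),
          inter_cons sep x (y :: t) (by simp)]
      simp [List.append_assoc]

-- one chunk of A's lines list, joined, is B's section string (char level)
lemma section_chars (title : String) (items : List String) :
    "\n".toList.intercalate
      ((("## " ++ title) ::
        ((if (items.map fmtLine).isEmpty then ["- None"] else items.map fmtLine) ++ [""])).map String.toList)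
    = (mkSection title items).toList := by
  cases items with
  | nil =>
    simp [mkSection, List.intercalate, List.intersperse, String.toList_append]
  | cons i is =>
    rw [fmt_eq_hint]
    simp only [List.map_cons, List.isEmpty_cons, if_neg (by simp : ¬ (false = true)),
      List.map_append, List.map_cons, List.map_nil]
    rw [inter_cons _ _ _ (by simp),
        inter_append _ _ [("" : String).toList] (by simp) (by simp)]
    simp [mkSection, String.toList_append, PySem.Str.toList_join, PySem.Chars.join,
      List.intercalate, List.intersperse]

-- A's whole lines list, joined, is B's concatenation of section strings
lemma render_eq (s a o : List String) :
    renderSections s a o =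
      "# Owned Meta\n\n"
        ++ mkSection "S-Tier" s ++ "\n"
        ++ mkSection "A-Tier" a ++ "\n"
        ++ mkSection "Other Owned Exotics" o := by
  apply String.toList_inj.mp
  have hne : ∀ (items : List String),
      (if (items.map fmtLine).isEmpty then ["- None"] else items.map fmtLine) ≠ [] := by
    intro items; split
    · simp
    · simp_all
  simp only [renderSections, List.foldl_cons, List.foldl_nil, PySem.Str.toList_join,
    PySem.Chars.join, String.toList_append]
  rw [show ∀ (b1 b2 b3 : List String),
        ((["# Owned Meta", ""] ++ ["## " ++ "S-Tier"] ++ b1 ++ [""] ++ ["## " ++ "A-Tier"] ++ b2 ++ [""]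
          ++ ["## " ++ "Other Owned Exotics"] ++ b3 ++ [""]) : List String)
        = "# Owned Meta" :: "" ::
            ((("## " ++ "S-Tier") :: (b1 ++ [""]))
              ++ ((("## " ++ "A-Tier") :: (b2 ++ [""]))
                ++ (("## " ++ "Other Owned Exotics") :: (b3 ++ [""]))))
      from by intros; simp]
  rw [List.map_cons, List.map_cons,
      inter_cons _ _ _ (by simp), inter_cons _ _ _ (by simp),
      List.map_append, inter_append _ _ _ (by simp) (by simp),
      List.map_append, inter_append _ _ _ (by simp) (by simp)]
  rw [section_chars, section_chars, section_chars]
  simp only [← List.append_assoc]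
  rw [show ("# Owned Meta".toList ++ "\n".toList ++ "".toList ++ "\n".toList : List Char)
        = "# Owned Meta\n\n".toList from by decide]

-- ===== VERDICT (by name: the statement is the Claim_ definition above) =====
theorem build_owned_meta_spec : Claim_equal_build_owned_meta := by
  intro owned _
  simp only [Spec_build_owned_meta, build_owned_meta, build_owned_meta_alt, classifyOwned]
  rw [classify_foldl, a_filter_eq, o_filter_eq]
  simp only [List.nil_append]
  exact render_eq _ _ _
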